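-- pv_equiv track=rewrite | github.com/cabell365/Python | games/slot_machine.py | get_combo_winnings
-- ===== SOURCE A (Python) =====
-- def get_combo_winnings(slot_symbols):
--
--     winnings = 0
--     slot_winning_combo_list = []
--     slot_winning_combos = {
--
--         5000: "777,777,777",
--         4000 : "BAR,BAR,BAR",
--         3000 : "GRAPES,GRAPES,GRAPES",
--         2000 : "CHERRY,CHERRY,CHERRY",
--         1000 : "ORANGE,ORANGE,ORANGE",
--         500 : "BELL,BELL,BELL",
--         400: "777,777,,BAR",
--         300: "777,BAR,,BAR",
--         200: "777,GRAPES,GRAPES",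
--         100: "777,CHERRY,CHERRY",
--         80: "BAR,CHERRY,BAR",
--         70: "CHERRY,BAR,CHERRY",
--         60: "GRAPES,CHERRY,CHERRY",
--         50: "CHERRY,BELL,BAR",
--         40: "BELL,CHERRY,GRAPE",
--         30: "BELL,CHERRY,ORANGE",
--         20: "BELL,GRAPE,ORANGE",
--         10: "ORANGE,GRAPE,CHERRY"
--
--         }
--
--     # Check for winning combinations by comparing lists
--     for credits, slot_winning_combo in slot_winning_combos.items():
--         slot_winning_combo_list=slot_winning_combo.split(",")
--         if slot_winning_combo_list == slot_symbols:
--             winnings = credits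
--
--     return winnings
-- ===== SOURCE B (Python) =====
-- PAYOUT_TABLE = {
--     ("777", "777", "777"): 5000,
--     ("BAR", "BAR", "BAR"): 4000,
--     ("GRAPES", "GRAPES", "GRAPES"): 3000,
--     ("CHERRY", "CHERRY", "CHERRY"): 2000,
--     ("ORANGE", "ORANGE", "ORANGE"): 1000,
--     ("BELL", "BELL", "BELL"): 500,
--     ("777", "777", "", "BAR"): 400,
--     ("777", "BAR", "", "BAR"): 300,
--     ("777", "GRAPES", "GRAPES"): 200,
--     ("777", "CHERRY", "CHERRY"): 100,
--     ("BAR", "CHERRY", "BAR"): 80,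
--     ("CHERRY", "BAR", "CHERRY"): 70,
--     ("GRAPES", "CHERRY", "CHERRY"): 60,
--     ("CHERRY", "BELL", "BAR"): 50,
--     ("BELL", "CHERRY", "GRAPE"): 40,
--     ("BELL", "CHERRY", "ORANGE"): 30,
--     ("BELL", "GRAPE", "ORANGE"): 20,
--     ("ORANGE", "GRAPE", "CHERRY"): 10,
-- }
--
-- def get_combo_winnings(slot_symbols):
--     return PAYOUT_TABLE.get(tuple(slot_symbols), 0)
-- ===== Notes on version B (the rewrite author's own statement) =====
-- stated objective: simpler
-- what changed: Replaced the per-call scan that splits each of the 18 comma-joined combo strings and overwrites winnings on match by a module-level payout table keyed by pre-split symbol tuples, answered with a single dict .get(tuple(slot_symbols), 0).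
import Mathlib
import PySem

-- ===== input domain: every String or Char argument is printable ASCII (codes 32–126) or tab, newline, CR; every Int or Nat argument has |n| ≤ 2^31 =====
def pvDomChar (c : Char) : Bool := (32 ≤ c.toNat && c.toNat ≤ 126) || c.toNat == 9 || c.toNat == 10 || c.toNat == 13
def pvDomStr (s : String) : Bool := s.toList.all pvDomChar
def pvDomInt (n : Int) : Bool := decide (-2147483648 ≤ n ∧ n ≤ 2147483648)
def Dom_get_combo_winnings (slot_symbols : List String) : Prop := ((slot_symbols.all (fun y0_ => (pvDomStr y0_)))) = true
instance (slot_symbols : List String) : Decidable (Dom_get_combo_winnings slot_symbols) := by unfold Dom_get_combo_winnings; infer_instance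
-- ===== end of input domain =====

-- B replaces A's per-call scan (splitting each comma-joined combo string and overwriting
-- winnings on match) by a constant payout table keyed by pre-split symbol tuples, answered
-- by a single lookup with default 0; objective: simpler, same payouts.

-- ===== PORT A =====
-- the dict literal of A, in insertion order
def pvCombos : List (Int × String) :=
  [(5000, "777,777,777"), (4000, "BAR,BAR,BAR"), (3000, "GRAPES,GRAPES,GRAPES"),
   (2000, "CHERRY,CHERRY,CHERRY"), (1000, "ORANGE,ORANGE,ORANGE"), (500, "BELL,BELL,BELL"),
   (400, "777,777,,BAR"), (300, "777,BAR,,BAR"), (200, "777,GRAPES,GRAPES"),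
   (100, "777,CHERRY,CHERRY"), (80, "BAR,CHERRY,BAR"), (70, "CHERRY,BAR,CHERRY"),
   (60, "GRAPES,CHERRY,CHERRY"), (50, "CHERRY,BELL,BAR"), (40, "BELL,CHERRY,GRAPE"),
   (30, "BELL,CHERRY,ORANGE"), (20, "BELL,GRAPE,ORANGE"), (10, "ORANGE,GRAPE,CHERRY")]

-- A: loop over the dict items, split each combo string, overwrite winnings on a match
def get_combo_winnings (slot_symbols : List String) : Int :=
  pvCombos.foldl
    (fun winnings cs =>
      if (PySem.Str.split? cs.2 ",").getD [] == slot_symbols then cs.1 else winnings)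
    0

-- ===== PORT B =====
-- B: a module-level dict literal keyed by pre-split symbol tuples (Python tuple of str ->
-- here List String, the tuple of the list argument), with one .get(..., 0) lookup
def pvPayoutTable : PySem.Dict (List String) Int :=
  PySem.Dict.ofList
    [(["777", "777", "777"], 5000),
     (["BAR", "BAR", "BAR"], 4000),
     (["GRAPES", "GRAPES", "GRAPES"], 3000),
     (["CHERRY", "CHERRY", "CHERRY"], 2000),
     (["ORANGE", "ORANGE", "ORANGE"], 1000),
     (["BELL", "BELL", "BELL"], 500),
     (["777", "777", "", "BAR"], 400),
     (["777", "BAR", "", "BAR"], 300),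
     (["777", "GRAPES", "GRAPES"], 200),
     (["777", "CHERRY", "CHERRY"], 100),
     (["BAR", "CHERRY", "BAR"], 80),
     (["CHERRY", "BAR", "CHERRY"], 70),
     (["GRAPES", "CHERRY", "CHERRY"], 60),
     (["CHERRY", "BELL", "BAR"], 50),
     (["BELL", "CHERRY", "GRAPE"], 40),
     (["BELL", "CHERRY", "ORANGE"], 30),
     (["BELL", "GRAPE", "ORANGE"], 20),
     (["ORANGE", "GRAPE", "CHERRY"], 10)]

def get_combo_winnings_alt (slot_symbols : List String) : Int :=
  pvPayoutTable.getD slot_symbols 0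

-- ===== PRECONDITION & SPEC =====
def Spec_get_combo_winnings (slot_symbols : List String) (out : Int) : Prop := out = get_combo_winnings_alt slot_symbols
instance (slot_symbols : List String) (out : Int) : Decidable (Spec_get_combo_winnings slot_symbols out) := by unfold Spec_get_combo_winnings; infer_instance

-- ===== CLAIM (what is proved, stated in full; the proofs are below) =====
def Claim_equal_get_combo_winnings : Prop := ∀ (slot_symbols : List String), Dom_get_combo_winnings slot_symbols → Spec_get_combo_winnings slot_symbols (get_combo_winnings slot_symbols)

-- ===== LEMMAS AND PROOFS =====

-- ===== VERDICT (by name: the statement is the Claim_ definition above) =====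
set_option maxHeartbeats 4000000 in
theorem get_combo_winnings_spec : Claim_equal_get_combo_winnings := by
  intro ss _
  unfold Spec_get_combo_winnings
  by_cases h0 : ss = ["777", "777", "777"]
  · subst h0; decide
  by_cases h1 : ss = ["BAR", "BAR", "BAR"]
  · subst h1; decide
  by_cases h2 : ss = ["GRAPES", "GRAPES", "GRAPES"]
  · subst h2; decide
  by_cases h3 : ss = ["CHERRY", "CHERRY", "CHERRY"]
  · subst h3; decide
  by_cases h4 : ss = ["ORANGE", "ORANGE", "ORANGE"]
  · subst h4; decide
  by_cases h5 : ss = ["BELL", "BELL", "BELL"]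
  · subst h5; decide
  by_cases h6 : ss = ["777", "777", "", "BAR"]
  · subst h6; decide
  by_cases h7 : ss = ["777", "BAR", "", "BAR"]
  · subst h7; decide
  by_cases h8 : ss = ["777", "GRAPES", "GRAPES"]
  · subst h8; decide
  by_cases h9 : ss = ["777", "CHERRY", "CHERRY"]
  · subst h9; decide
  by_cases h10 : ss = ["BAR", "CHERRY", "BAR"]
  · subst h10; decide
  by_cases h11 : ss = ["CHERRY", "BAR", "CHERRY"]
  · subst h11; decide
  by_cases h12 : ss = ["GRAPES", "CHERRY", "CHERRY"]
  · subst h12; decide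
  by_cases h13 : ss = ["CHERRY", "BELL", "BAR"]
  · subst h13; decide
  by_cases h14 : ss = ["BELL", "CHERRY", "GRAPE"]
  · subst h14; decide
  by_cases h15 : ss = ["BELL", "CHERRY", "ORANGE"]
  · subst h15; decide
  by_cases h16 : ss = ["BELL", "GRAPE", "ORANGE"]
  · subst h16; decide
  by_cases h17 : ss = ["ORANGE", "GRAPE", "CHERRY"]
  · subst h17; decide
  -- ss matches none of the 18 combos: both the scan and the table lookup give 0
  have e0 : (PySem.Str.split? "777,777,777" ",").getD [] = ["777", "777", "777"] := by decide
  have e1 : (PySem.Str.split? "BAR,BAR,BAR" ",").getD [] = ["BAR", "BAR", "BAR"] := by decide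
  have e2 : (PySem.Str.split? "GRAPES,GRAPES,GRAPES" ",").getD [] = ["GRAPES", "GRAPES", "GRAPES"] := by decide
  have e3 : (PySem.Str.split? "CHERRY,CHERRY,CHERRY" ",").getD [] = ["CHERRY", "CHERRY", "CHERRY"] := by decide
  have e4 : (PySem.Str.split? "ORANGE,ORANGE,ORANGE" ",").getD [] = ["ORANGE", "ORANGE", "ORANGE"] := by decide
  have e5 : (PySem.Str.split? "BELL,BELL,BELL" ",").getD [] = ["BELL", "BELL", "BELL"] := by decide
  have e6 : (PySem.Str.split? "777,777,,BAR" ",").getD [] = ["777", "777", "", "BAR"] := by decide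
  have e7 : (PySem.Str.split? "777,BAR,,BAR" ",").getD [] = ["777", "BAR", "", "BAR"] := by decide
  have e8 : (PySem.Str.split? "777,GRAPES,GRAPES" ",").getD [] = ["777", "GRAPES", "GRAPES"] := by decide
  have e9 : (PySem.Str.split? "777,CHERRY,CHERRY" ",").getD [] = ["777", "CHERRY", "CHERRY"] := by decide
  have e10 : (PySem.Str.split? "BAR,CHERRY,BAR" ",").getD [] = ["BAR", "CHERRY", "BAR"] := by decide
  have e11 : (PySem.Str.split? "CHERRY,BAR,CHERRY" ",").getD [] = ["CHERRY", "BAR", "CHERRY"] := by decide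
  have e12 : (PySem.Str.split? "GRAPES,CHERRY,CHERRY" ",").getD [] = ["GRAPES", "CHERRY", "CHERRY"] := by decide
  have e13 : (PySem.Str.split? "CHERRY,BELL,BAR" ",").getD [] = ["CHERRY", "BELL", "BAR"] := by decide
  have e14 : (PySem.Str.split? "BELL,CHERRY,GRAPE" ",").getD [] = ["BELL", "CHERRY", "GRAPE"] := by decide
  have e15 : (PySem.Str.split? "BELL,CHERRY,ORANGE" ",").getD [] = ["BELL", "CHERRY", "ORANGE"] := by decide
  have e16 : (PySem.Str.split? "BELL,GRAPE,ORANGE" ",").getD [] = ["BELL", "GRAPE", "ORANGE"] := by decide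
  have e17 : (PySem.Str.split? "ORANGE,GRAPE,CHERRY" ",").getD [] = ["ORANGE", "GRAPE", "CHERRY"] := by decide
  have hA : get_combo_winnings ss = 0 := by
    simp only [get_combo_winnings, pvCombos, List.foldl, e0, e1, e2, e3, e4, e5, e6, e7, e8, e9,
      e10, e11, e12, e13, e14, e15, e16, e17]
    simp only [beq_iff_eq]
    rw [if_neg (fun h => h17 h.symm), if_neg (fun h => h16 h.symm), if_neg (fun h => h15 h.symm), if_neg (fun h => h14 h.symm), if_neg (fun h => h13 h.symm), if_neg (fun h => h12 h.symm), if_neg (fun h => h11 h.symm), if_neg (fun h => h10 h.symm), if_neg (fun h => h9 h.symm), if_neg (fun h => h8 h.symm), if_neg (fun h => h7 h.symm), if_neg (fun h => h6 h.symm), if_neg (fun h => h5 h.symm), if_neg (fun h => h4 h.symm), if_neg (fun h => h3 h.symm), if_neg (fun h => h2 h.symm), if_neg (fun h => h1 h.symm), if_neg (fun h => h0 h.symm)]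
  have hB : get_combo_winnings_alt ss = 0 := by
    have htab : pvPayoutTable.items = [(["777", "777", "777"], (5000 : Int)), (["BAR", "BAR", "BAR"], (4000 : Int)), (["GRAPES", "GRAPES", "GRAPES"], (3000 : Int)), (["CHERRY", "CHERRY", "CHERRY"], (2000 : Int)), (["ORANGE", "ORANGE", "ORANGE"], (1000 : Int)), (["BELL", "BELL", "BELL"], (500 : Int)), (["777", "777", "", "BAR"], (400 : Int)), (["777", "BAR", "", "BAR"], (300 : Int)), (["777", "GRAPES", "GRAPES"], (200 : Int)), (["777", "CHERRY", "CHERRY"], (100 : Int)), (["BAR", "CHERRY", "BAR"], (80 : Int)), (["CHERRY", "BAR", "CHERRY"], (70 : Int)), (["GRAPES", "CHERRY", "CHERRY"], (60 : Int)), (["CHERRY", "BELL", "BAR"], (50 : Int)), (["BELL", "CHERRY", "GRAPE"], (40 : Int)), (["BELL", "CHERRY", "ORANGE"], (30 : Int)), (["BELL", "GRAPE", "ORANGE"], (20 : Int)), (["ORANGE", "GRAPE", "CHERRY"], (10 : Int))] := by decide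
    simp only [get_combo_winnings_alt, PySem.Dict.getD]
    rw [show pvPayoutTable = PySem.Dict.mk pvPayoutTable.items from rfl, htab]
    simp only [PySem.Dict.get?_mk_cons, beq_iff_eq]
    rw [if_neg (fun h => h0 h.symm), if_neg (fun h => h1 h.symm), if_neg (fun h => h2 h.symm),
        if_neg (fun h => h3 h.symm), if_neg (fun h => h4 h.symm), if_neg (fun h => h5 h.symm),
        if_neg (fun h => h6 h.symm), if_neg (fun h => h7 h.symm), if_neg (fun h => h8 h.symm),
        if_neg (fun h => h9 h.symm), if_neg (fun h => h10 h.symm), if_neg (fun h => h11 h.symm),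
        if_neg (fun h => h12 h.symm), if_neg (fun h => h13 h.symm), if_neg (fun h => h14 h.symm),
        if_neg (fun h => h15 h.symm), if_neg (fun h => h16 h.symm), if_neg (fun h => h17 h.symm)]
    rfl
  rw [hA, hB]
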